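-- pv_equiv track=rewrite | github.com/LesFeesSpeciales/tools | various_scripts/stamp/stamp_settings.py | get_name_pattern
-- ===== SOURCE A (Python) =====
-- def get_name_pattern(name, token='#'):
--     """Get a string's padding pattern"""
--
--     l = ['']
--
--     last_isdigit = name[0].isdigit()
--
--     for c in name:
--         if last_isdigit == c.isdigit():
--             l[-1]+=c
--         else:
--             l.append(c)
--
--             last_isdigit = not last_isdigit
--
--
--     for i in range(len(l)-1, -1, -1):
--         if l[i][0].isdigit():
--             l[i] = token #* len(l[i])
--             break
--
--
--     out = ''.join(l)
--     return out
-- ===== SOURCE B (Python) =====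
-- def get_name_pattern(name, token='#'):
--     """Get a string's padding pattern"""
--     i = len(name)
--     while i > 0 and not name[i-1].isdigit():
--         i -= 1
--     if i == 0:
--         return name
--     end = i
--     while i > 0 and name[i-1].isdigit():
--         i -= 1
--     return name[:i] + token + name[end:]
-- ===== Notes on version B (the rewrite author's own statement) =====
-- stated objective: faster
-- what changed: Instead of building a list of all digit/non-digit runs (with O(n^2) repeated l[-1]+=c string appends) and scanning that list backwards, B scans the string itself from the right to find the last digit run's bounds and splices name[:start] + token + name[end:] in one pass.
import Mathlib
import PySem

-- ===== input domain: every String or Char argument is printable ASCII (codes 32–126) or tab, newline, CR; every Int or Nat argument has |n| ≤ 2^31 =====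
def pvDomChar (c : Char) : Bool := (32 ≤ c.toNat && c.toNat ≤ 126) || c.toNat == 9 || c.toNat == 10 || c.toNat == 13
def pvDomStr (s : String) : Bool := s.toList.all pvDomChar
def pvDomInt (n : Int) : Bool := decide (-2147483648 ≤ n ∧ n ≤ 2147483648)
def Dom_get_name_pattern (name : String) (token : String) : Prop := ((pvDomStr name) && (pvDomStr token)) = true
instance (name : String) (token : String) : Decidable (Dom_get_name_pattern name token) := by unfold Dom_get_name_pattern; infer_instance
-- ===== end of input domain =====

-- B replaces A's run-list construction (quadratic repeated string appends) by a direct right-to-left scan for the last digit run (measured faster); return-value equivalence proved for nonempty names (A raises IndexError on "").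

-- ===== PORT A =====
-- the body of A's first for-loop: l[-1] += c  /  l.append(c); last_isdigit = not last_isdigit
def pvStepA (st : List (List Char) × Bool) (c : Char) : List (List Char) × Bool :=
  if st.2 == PySem.Chars.isdigit c then
    (PySem.List.pySetD st.1 (-1) (PySem.List.pyGetD st.1 (-1) [] ++ [c]), st.2)
  else
    (st.1 ++ [[c]], !st.2)

-- for i in range(len(l)-1, -1, -1): if l[i][0].isdigit(): l[i] = token; break
-- (every run is nonempty when name is, so the in-range getD/headD defaults are never read)
def pvReplaceLoop (l : List (List Char)) (tok : List Char) : Nat → List (List Char)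
  | 0 => l
  | i + 1 =>
    if PySem.Chars.isdigit ((l.getD i []).headD ' ') then l.set i tok
    else pvReplaceLoop l tok i

def pvA (cs tok : List Char) : List Char :=
  match PySem.List.pyGet? cs 0 with
  | none => []  -- Python: name[0] raises IndexError here; excluded by Pre_
  | some c0 =>
    let st := cs.foldl pvStepA ([[]], PySem.Chars.isdigit c0)
    (pvReplaceLoop st.1 tok st.1.length).flatten  -- ''.join(l)

def get_name_pattern (name : String) (token : String) : String :=
  String.ofList (pvA name.toList token.toList)

-- ===== PORT B =====
-- while i > 0 and not name[i-1].isdigit(): i -= 1   (returns the final i)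
def pvScanNonDigit (cs : List Char) : Nat → Nat
  | 0 => 0
  | i + 1 => if !PySem.Chars.isdigit (cs.getD i ' ') then pvScanNonDigit cs i else i + 1

-- while i > 0 and name[i-1].isdigit(): i -= 1
def pvScanDigit (cs : List Char) : Nat → Nat
  | 0 => 0
  | i + 1 => if PySem.Chars.isdigit (cs.getD i ' ') then pvScanDigit cs i else i + 1

def get_name_pattern_alt (name : String) (token : String) : String :=
  let cs := name.toList
  let e := pvScanNonDigit cs cs.length
  if e = 0 then name
  else String.ofList (cs.take (pvScanDigit cs e) ++ token.toList ++ cs.drop e)  -- name[:i] + token + name[end:]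

-- ===== PRECONDITION & SPEC =====
-- Pre_ excludes exactly the empty name, on which A raises IndexError (name[0]).
def Pre_get_name_pattern (name : String) (token : String) : Prop := name ≠ ""
instance (name : String) (token : String) : Decidable (Pre_get_name_pattern name token) := by unfold Pre_get_name_pattern; infer_instance
def pvWitness_get_name_pattern : String × String := ("shot_010_v2", "#")

def Spec_get_name_pattern (name : String) (token : String) (out : String) : Prop := out = get_name_pattern_alt name token
instance (name : String) (token : String) (out : String) : Decidable (Spec_get_name_pattern name token out) := by unfold Spec_get_name_pattern; infer_instance

-- ===== CLAIM (what is proved, stated in full; the proofs are below) =====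
def Claim_equal_get_name_pattern : Prop := ∀ (name : String) (token : String), Dom_get_name_pattern name token → Pre_get_name_pattern name token → Spec_get_name_pattern name token (get_name_pattern name token)

-- ===== LEMMAS AND PROOFS =====

-- abbreviation used only in the proofs
def pvD (c : Char) : Bool := PySem.Chars.isdigit c
def pvP (c : Char) : Bool := !PySem.Chars.isdigit c

-- the run decomposition A's first loop builds, defined on the REVERSED input
def pvRunsRev : List Char → List (List Char)
  | [] => []
  | c :: rs =>
    pvRunsRev ((c :: rs).dropWhile (fun x => pvD x == pvD c)) ++
      [((c :: rs).takeWhile (fun x => pvD x == pvD c)).reverse]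
termination_by rs => rs.length
decreasing_by
  simp only [List.dropWhile_cons, pvD, beq_self_eq_true, if_true]
  exact Nat.lt_succ_of_le (List.length_dropWhile_le _ _)

-- the common closed form both ports are reduced to
def pvSpec (cs tok : List Char) : List Char :=
  let r := cs.reverse
  if (r.dropWhile pvP) = [] then cs
  else ((r.dropWhile pvP).dropWhile pvD).reverse ++ tok ++ (r.takeWhile pvP).reverse

-- the first element surviving dropWhile fails the predicate
theorem pvDropWhile_eq_cons {a : Type} (p : a → Bool) :
    ∀ (l : List a) (dh : a) (dt : List a), l.dropWhile p = dh :: dt → p dh = false := by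
  intro l
  induction l with
  | nil => intro _ _ h; simp at h
  | cons x l ih =>
    intro dh dt h
    rw [List.dropWhile_cons] at h
    by_cases hp : p x = true
    · rw [if_pos hp] at h; exact ih _ _ h
    · rw [if_neg hp] at h
      cases h
      simpa using hp

-- flattening the run decomposition gives back the input (in original order)
theorem pvRunsRev_flatten (rs : List Char) : (pvRunsRev rs).flatten = rs.reverse := by
  induction rs using pvRunsRev.induct with
  | case1 => simp [pvRunsRev]
  | case2 c rs ih =>
    rw [pvRunsRev]
    simp only [List.flatten_append, List.flatten_cons, List.flatten_nil, List.append_nil, ih]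
    rw [← List.reverse_append, List.takeWhile_append_dropWhile]

-- the run list always ends with the run of the last character
theorem pvRunsRev_last (c : Char) (rs : List Char) :
    pvRunsRev (c :: rs) =
      pvRunsRev ((c :: rs).dropWhile (fun x => pvD x == pvD c)) ++
        [((c :: rs).takeWhile (fun x => pvD x == pvD c)).reverse] := by
  rw [pvRunsRev]

-- A's first loop builds exactly the run decomposition, and tracks the digit-ness of the last run
theorem pvFoldA_eq (cs : List Char) (h : cs ≠ []) :
    cs.foldl pvStepA ([[]], pvD (cs.headD ' ')) =
      (pvRunsRev cs.reverse, pvD (cs.reverse.headD ' ')) := by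
  induction cs using List.reverseRecOn with
  | nil => exact absurd rfl h
  | append_singleton cs c ih =>
    cases hcs : cs with
    | nil =>
      simp [pvStepA, pvRunsRev, pvD, PySem.List.pySetD, PySem.List.pySet?, PySem.List.pyIdx?,
        PySem.List.pyGetD, PySem.List.pyGet?]
    | cons c0 rest =>
      have hne : cs ≠ [] := by simp [hcs]
      rw [← hcs]
      have hhead : (cs ++ [c]).headD ' ' = cs.headD ' ' := by
        cases cs with | nil => exact absurd hcs (by simp_all) | cons a l => simp
      rw [List.foldl_append, hhead, ih hne]
      have hr : cs.reverse ≠ [] := by simpa using hne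
      obtain ⟨rh, rt, hrt⟩ := List.exists_cons_of_ne_nil hr
      simp only [List.foldl_cons, List.foldl_nil, List.reverse_append, List.reverse_cons,
        List.reverse_nil, List.nil_append, List.singleton_append]
      rw [hrt]
      simp only [List.headD_cons]
      -- unfold the step
      by_cases hb : PySem.Chars.isdigit rh = PySem.Chars.isdigit c
      · -- same digit-ness: the last run is extended
        rw [pvRunsRev_last c (rh :: rt), pvRunsRev_last rh rt]
        simp only [pvStepA, pvD]
        rw [if_pos (by simp [hb])]
        rw [PySem.List.pyGetD_neg_one_append_singleton]
        rw [hb]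
        simp [PySem.List.pySetD, PySem.List.pySet?, PySem.List.pyIdx?]
      · -- digit-ness flips: a new singleton run is appended
        rw [pvRunsRev_last c (rh :: rt)]
        simp only [pvStepA, pvD]
        rw [if_neg (by simpa using hb)]
        have hrb : (PySem.Chars.isdigit rh == PySem.Chars.isdigit c) = false := by
          cases h1 : PySem.Chars.isdigit c <;> cases h2 : PySem.Chars.isdigit rh <;> simp_all
        have hbool : (!PySem.Chars.isdigit rh) = PySem.Chars.isdigit c := by
          cases h2 : PySem.Chars.isdigit rh
          · cases h1 : PySem.Chars.isdigit c
            · exact absurd (h2.trans h1.symm) hb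
            · rfl
          · cases h1 : PySem.Chars.isdigit c
            · rfl
            · exact absurd (h2.trans h1.symm) hb
        simp only [List.dropWhile_cons, List.takeWhile_cons, beq_self_eq_true, if_true, hrb,
          Bool.false_eq_true, if_false, List.reverse_cons, List.reverse_nil, List.nil_append]
        exact congrArg₂ Prod.mk rfl hbool

-- the replace loop commutes with a trailing run it skips or never reaches
theorem pvReplaceLoop_append (l : List (List Char)) (x : List Char) (tok : List Char) :
    ∀ i, i ≤ l.length → pvReplaceLoop (l ++ [x]) tok i = pvReplaceLoop l tok i ++ [x] := by
  intro i
  induction i with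
  | zero => intro _; rfl
  | succ i ih =>
    intro h
    have hi : i < l.length := h
    rw [pvReplaceLoop, pvReplaceLoop]
    rw [List.getD, List.getElem?_append_left hi, ← List.getD]
    split
    · rw [List.set_append_left _ _ hi]
    · exact ih (le_of_lt hi)

-- replacing the last digit run, when the string ends with a digit
theorem pvReplace_digit (rh : Char) (rt : List Char) (tok : List Char)
    (hb : pvD rh = true) :
    (pvReplaceLoop (pvRunsRev (rh :: rt)) tok (pvRunsRev (rh :: rt)).length).flatten =
      ((rh :: rt).dropWhile pvD).reverse ++ tok := by
  have hq : (fun x => pvD x == pvD rh) = pvD := by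
    funext x; rw [hb]; simp
  rw [pvRunsRev_last, hq]
  set r := rh :: rt with hr
  set l' := pvRunsRev (r.dropWhile pvD) with hl'
  set run := (r.takeWhile pvD).reverse with hrun
  have hlen : (l' ++ [run]).length = l'.length + 1 := by simp
  rw [hlen, pvReplaceLoop]
  have hget : (l' ++ [run]).getD l'.length [] = run := by
    simp [List.getD]
  rw [hget]
  have hrun_ne : run ≠ [] := by
    rw [hrun, hr]; simp [List.takeWhile_cons_of_pos hb]
  have hhd : PySem.Chars.isdigit (run.headD ' ') = true := by
    have hmem : run.headD ' ' ∈ run := by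
      obtain ⟨a, l, hal⟩ := List.exists_cons_of_ne_nil hrun_ne
      rw [hal]; simp
    rw [hrun, List.mem_reverse] at hmem
    exact List.mem_takeWhile_imp hmem
  rw [if_pos hhd]
  have hset : (l' ++ [run]).set l'.length tok = l' ++ [tok] := by simp
  rw [hset]
  simp [hl', pvRunsRev_flatten]

theorem pvA_eq_spec (cs tok : List Char) (h : cs ≠ []) : pvA cs tok = pvSpec cs tok := by
  obtain ⟨c0, rest, rfl⟩ := List.exists_cons_of_ne_nil h
  rw [pvA]
  rw [PySem.List.pyGet?_zero_cons]
  have hfold := pvFoldA_eq (c0 :: rest) h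
  simp only [List.headD_cons, pvD] at hfold
  have hr : (c0 :: rest).reverse ≠ [] := by simp
  obtain ⟨rh, rt, hrt⟩ := List.exists_cons_of_ne_nil hr
  rw [hrt] at hfold
  have hcs_eq : c0 :: rest = (rh :: rt).reverse := by rw [← hrt, List.reverse_reverse]
  simp only [hfold]
  rw [pvSpec]
  simp only [hrt]
  by_cases hd : pvD rh = true
  · -- last character is a digit: its run is replaced
    rw [pvReplace_digit rh rt tok hd]
    have : (rh :: rt).dropWhile pvP = rh :: rt := by
      rw [List.dropWhile_cons_of_neg]; simp [pvP, pvD] at hd ⊢; exact hd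
    rw [this, if_neg (by simp)]
    have : (rh :: rt).takeWhile pvP = [] := by
      rw [List.takeWhile_cons_of_neg]; simp [pvP, pvD] at hd ⊢; exact hd
    rw [this]
    simp
  · -- last character is not a digit: skip the trailing non-digit run
    have hdf : pvD rh = false := by simpa using hd
    have hdf' : PySem.Chars.isdigit rh = false := hdf
    have hq : (fun x => pvD x == pvD rh) = pvP := by
      funext x; rw [hdf]; cases hx : pvD x <;> simp [pvP, pvD] at hx ⊢ <;> simp_all [pvD]
    rw [pvRunsRev_last, hq]
    set l' := pvRunsRev ((rh :: rt).dropWhile pvP) with hl'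
    set run := ((rh :: rt).takeWhile pvP).reverse with hrun
    have hlen : (l' ++ [run]).length = l'.length + 1 := by simp
    rw [hlen, pvReplaceLoop]
    have hget : (l' ++ [run]).getD l'.length [] = run := by simp [List.getD]
    rw [hget]
    have hprh : pvP rh = true := by unfold pvP; rw [hdf']; rfl
    have hrun_ne : run ≠ [] := by
      rw [hrun]; simp [List.takeWhile_cons_of_pos hprh]
    have hhd : PySem.Chars.isdigit (run.headD ' ') = false := by
      have hmem : run.headD ' ' ∈ run := by
        obtain ⟨a, l, hal⟩ := List.exists_cons_of_ne_nil hrun_ne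
        rw [hal]; simp
      rw [hrun, List.mem_reverse] at hmem
      have h2 := List.mem_takeWhile_imp hmem
      simp only [pvP, Bool.not_eq_true'] at h2
      exact h2
    rw [if_neg (by rw [hhd]; simp)]
    rw [pvReplaceLoop_append _ _ _ _ (le_refl _)]
    cases hdw : (rh :: rt).dropWhile pvP with
    | nil =>
      rw [if_pos rfl]
      rw [hdw] at hl'
      rw [hcs_eq]
      simp only [hl', pvRunsRev, pvReplaceLoop, List.nil_append, List.flatten_cons,
        List.flatten_nil, List.append_nil, hrun]
      have htw : (rh :: rt).takeWhile pvP = rh :: rt := by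
        have h3 := List.takeWhile_append_dropWhile (p := pvP) (l := rh :: rt)
        rw [hdw, List.append_nil] at h3; exact h3
      rw [htw]
      simp [pvReplaceLoop]
    | cons dh dt =>
      have hdh : pvD dh = true := by
        have h4 := pvDropWhile_eq_cons pvP (rh :: rt) dh dt hdw
        simp only [pvP, Bool.not_eq_false'] at h4
        exact h4
      rw [if_neg (by simp)]
      rw [hl', hdw, List.flatten_append]
      rw [pvReplace_digit dh dt tok hdh]
      simp [hrun]

theorem pvScanNonDigit_eq (cs : List Char) :
    ∀ i, i ≤ cs.length → pvScanNonDigit cs i = ((cs.take i).reverse.dropWhile pvP).length := by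
  intro i
  induction i with
  | zero => intro _; simp [pvScanNonDigit]
  | succ i ih =>
    intro h
    have hi : i < cs.length := h
    have ht : cs.take (i + 1) = cs.take i ++ [cs[i]] := by
      rw [List.take_succ]; simp [List.getElem?_eq_getElem hi]
    have hg : cs.getD i ' ' = cs[i] := by simp [List.getD, List.getElem?_eq_getElem hi]
    rw [pvScanNonDigit, hg, ht]
    simp only [List.reverse_append, List.reverse_cons, List.reverse_nil, List.nil_append,
      List.singleton_append, List.dropWhile_cons]
    by_cases hd : PySem.Chars.isdigit cs[i]
    · rw [if_neg (by simp [hd]), if_neg (by simp [pvP, hd])]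
      simp [Nat.min_eq_left (le_of_lt hi)]
    · rw [if_pos (by simp [hd]), if_pos (by simp [pvP, hd])]
      exact ih (le_of_lt hi)

theorem pvScanDigit_eq (cs : List Char) :
    ∀ i, i ≤ cs.length → pvScanDigit cs i = ((cs.take i).reverse.dropWhile pvD).length := by
  intro i
  induction i with
  | zero => intro _; simp [pvScanDigit]
  | succ i ih =>
    intro h
    have hi : i < cs.length := h
    have ht : cs.take (i + 1) = cs.take i ++ [cs[i]] := by
      rw [List.take_succ]; simp [List.getElem?_eq_getElem hi]
    have hg : cs.getD i ' ' = cs[i] := by simp [List.getD, List.getElem?_eq_getElem hi]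
    rw [pvScanDigit, hg, ht]
    simp only [List.reverse_append, List.reverse_cons, List.reverse_nil, List.nil_append,
      List.singleton_append, List.dropWhile_cons]
    by_cases hd : PySem.Chars.isdigit cs[i]
    · rw [if_pos hd, if_pos (by simp [pvD, hd])]
      exact ih (le_of_lt hi)
    · rw [if_neg hd, if_neg (by simp [pvD, hd])]
      simp [Nat.min_eq_left (le_of_lt hi)]

theorem pvB_eq_spec (name token : String) (h : name.toList ≠ []) :
    get_name_pattern_alt name token = String.ofList (pvSpec name.toList token.toList) := by
  rw [get_name_pattern_alt]
  set cs := name.toList with hcs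
  set r := cs.reverse with hrv
  have h1 : pvScanNonDigit cs cs.length = (r.dropWhile pvP).length := by
    rw [pvScanNonDigit_eq cs cs.length (le_refl _), List.take_length]
  rw [pvSpec]
  simp only [← hrv, h1]
  by_cases he : (r.dropWhile pvP) = []
  · rw [he]
    simp [hcs, String.ofList_toList]
  · rw [if_neg (by simpa using he), if_neg he]
    set u := r.dropWhile pvP with hu
    -- cs splits as u.reverse ++ (r.takeWhile pvP).reverse
    have hsplit : cs = u.reverse ++ (r.takeWhile pvP).reverse := by
      rw [hu, ← List.reverse_append, List.takeWhile_append_dropWhile, hrv, List.reverse_reverse]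
    have hulen : u.length ≤ cs.length := by
      rw [hsplit]; simp
    have htake : cs.take u.length = u.reverse := by
      rw [hsplit, ← List.length_reverse (as := u), List.take_left]
    have hdrop : cs.drop u.length = (r.takeWhile pvP).reverse := by
      rw [hsplit, ← List.length_reverse (as := u), List.drop_left]
    have h2 : pvScanDigit cs u.length = (u.dropWhile pvD).length := by
      rw [pvScanDigit_eq cs u.length hulen, htake, List.reverse_reverse]
    rw [h2]
    have husplit : u.reverse = (u.dropWhile pvD).reverse ++ (u.takeWhile pvD).reverse := by
      rw [← List.reverse_append, List.takeWhile_append_dropWhile]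
    have htake2 : cs.take (u.dropWhile pvD).length = (u.dropWhile pvD).reverse := by
      rw [hsplit, husplit, List.append_assoc, ← List.length_reverse (as := u.dropWhile pvD),
        List.take_left]
    rw [htake2, hdrop]

-- ===== VERDICT (by name: the statement is the Claim_ definition above) =====
theorem get_name_pattern_spec : Claim_equal_get_name_pattern := by
  intro name token _ hpre
  have h : name.toList ≠ [] := by
    simpa using hpre
  show get_name_pattern name token = get_name_pattern_alt name token
  rw [get_name_pattern, pvA_eq_spec _ _ h, pvB_eq_spec _ _ h]
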